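-- pv_equiv track=rewrite | github.com/stunt-and-gimmicks-alex/en-dash | backend/app/services/docker_unified.py | _calculate_service_status
-- ===== SOURCE A (Python) =====
-- from typing import Dict, List, Any, Optional, Union
--
-- def _calculate_service_status(containers: List) -> str:
--     """Calculate service status based on its containers"""
--     if not containers:
--         return "no_containers"
--
--     running = sum(1 for c in containers if c["status"] == "running")
--     total = len(containers)
--
--     if running == 0:
--         return "stopped"
--     elif running == total:
--         return "running"
--     else:
--         return "partial"
-- ===== SOURCE B (Python) =====
-- def _calculate_service_status(containers):
--     """Calculate service status based on its containers"""
--     if not containers: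
--         return "no_containers"
--
--     first_running = containers[0]["status"] == "running"
--     for c in containers[1:]:
--         if (c["status"] == "running") != first_running:
--             return "partial"
--
--     return "running" if first_running else "stopped"
-- ===== Notes on version B (the rewrite author's own statement) =====
-- stated objective: alternative
-- what changed: Instead of counting running containers and comparing the count with 0 and with len(containers), B compares each later container's running-flag with the first container's and returns 'partial' immediately at the first disagreement; agreement throughout means all-running or none-running, decided by the first flag alone.
import Mathlib
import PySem

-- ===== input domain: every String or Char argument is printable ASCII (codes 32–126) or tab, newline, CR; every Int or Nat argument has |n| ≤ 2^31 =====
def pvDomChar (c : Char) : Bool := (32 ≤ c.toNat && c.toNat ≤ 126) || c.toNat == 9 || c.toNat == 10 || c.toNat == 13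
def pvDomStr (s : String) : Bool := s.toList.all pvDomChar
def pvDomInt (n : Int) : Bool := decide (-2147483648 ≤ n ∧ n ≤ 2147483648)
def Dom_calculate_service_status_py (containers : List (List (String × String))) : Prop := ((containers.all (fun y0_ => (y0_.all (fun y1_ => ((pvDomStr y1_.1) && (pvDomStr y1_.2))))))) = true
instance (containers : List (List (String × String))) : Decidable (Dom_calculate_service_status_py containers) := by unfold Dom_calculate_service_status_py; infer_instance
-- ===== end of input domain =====

-- B replaces A's running-counter and count comparisons with an early-exit scan that compares each
-- container's running-flag against the first container's (alternative decomposition; same O(n) cost).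
-- ===== PORT A =====
def calculate_service_status_py (containers : List (List (String × String))) : String :=
  if containers = [] then "no_containers"
  else
    let running : Int :=
      containers.foldl (fun acc c =>
        if (PySem.Dict.mk c).get? "status" = some "running" then acc + 1 else acc) 0
    let total : Int := containers.length
    if running = 0 then "stopped"
    else if running = total then "running"
    else "partial"

-- ===== PORT B =====
-- containers[0] / containers[1:] ported via the head/tail of the nonempty match (identical for nonempty lists).
def calculate_service_status_py_alt (containers : List (List (String × String))) : String :=
  match containers with
  | [] => "no_containers"
  | c0 :: rest =>
    let firstRunning : Bool := (PySem.Dict.mk c0).get? "status" == some "running"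
    if rest.any (fun c => (((PySem.Dict.mk c).get? "status" == some "running")) != firstRunning)
    then "partial"
    else if firstRunning then "running" else "stopped"

-- ===== PRECONDITION & SPEC =====
-- Pre_ excludes exactly the containers lacking a "status" key, on which Python A (c["status"]) raises KeyError.
def Pre_calculate_service_status_py (containers : List (List (String × String))) : Prop :=
  ∀ c ∈ containers, ((PySem.Dict.mk c).get? "status").isSome
instance (containers : List (List (String × String))) : Decidable (Pre_calculate_service_status_py containers) := by unfold Pre_calculate_service_status_py; infer_instance
def pvWitness_calculate_service_status_py : (List (List (String × String))) := [[("status", "running")], [("status", "exited")]]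

def Spec_calculate_service_status_py (containers : List (List (String × String))) (out : String) : Prop := out = calculate_service_status_py_alt containers
instance (containers : List (List (String × String))) (out : String) : Decidable (Spec_calculate_service_status_py containers out) := by unfold Spec_calculate_service_status_py; infer_instance

-- ===== CLAIM (what is proved, stated in full; the proofs are below) =====
def Claim_equal_calculate_service_status_py : Prop := ∀ (containers : List (List (String × String))), Dom_calculate_service_status_py containers → Pre_calculate_service_status_py containers → Spec_calculate_service_status_py containers (calculate_service_status_py containers)

-- ===== LEMMAS AND PROOFS =====
def pvRun (c : List (String × String)) : Bool := (PySem.Dict.mk c).get? "status" == some "running"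

lemma pvCnt (l : List (List (String × String))) (acc : Int) :
    l.foldl (fun acc c => if (PySem.Dict.mk c).get? "status" = some "running" then acc + 1 else acc) acc
      = acc + ((l.countP pvRun : Nat) : Int) := by
  induction l generalizing acc with
  | nil => simp
  | cons c t ih =>
    simp only [List.foldl_cons, List.countP_cons]
    rw [ih]
    by_cases h : (PySem.Dict.mk c).get? "status" = some "running"
    · have h2 : pvRun c = true := by simpa [pvRun] using h
      simp [h, h2]; ring
    · have h2 : pvRun c = false := by simpa [pvRun] using h
      simp [h, h2]

-- ===== VERDICT (by name: the statement is the Claim_ definition above) =====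
theorem calculate_service_status_py_spec : Claim_equal_calculate_service_status_py := by
  intro containers _ _
  unfold Spec_calculate_service_status_py calculate_service_status_py calculate_service_status_py_alt
  match containers with
  | [] => simp
  | c0 :: rest =>
    simp only [if_neg (List.cons_ne_nil c0 rest)]
    rw [pvCnt]
    show (if (0 : Int) + ((c0 :: rest).countP pvRun : Int) = 0 then "stopped"
          else if (0 : Int) + ((c0 :: rest).countP pvRun : Int) = ((c0 :: rest).length : Int) then "running"
          else "partial")
        = (if (rest.any fun c => pvRun c != pvRun c0) = true then "partial"
           else if pvRun c0 = true then "running" else "stopped")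
    by_cases hany : rest.any (fun c => pvRun c != pvRun c0) = true
    · -- a disagreement exists: A's count is neither 0 nor total → "partial" on both sides
      obtain ⟨c, hc, hne⟩ := List.any_eq_true.mp hany
      have hne' : pvRun c ≠ pvRun c0 := by simpa using hne
      have hle : (c0 :: rest).countP pvRun ≤ (c0 :: rest).length := List.countP_le_length
      have h0 : (c0 :: rest).countP pvRun ≠ 0 := by
        intro h
        have hall := List.countP_eq_zero.mp h
        cases hc0 : pvRun c0 with
        | true => exact absurd hc0 (by simpa using hall c0 (List.mem_cons_self))
        | false =>
          have : pvRun c = false := by simpa using hall c (List.mem_cons_of_mem _ hc)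
          exact hne' (by rw [this, hc0])
      have hlen : (c0 :: rest).countP pvRun ≠ (c0 :: rest).length := by
        intro h
        have hall := List.countP_eq_length.mp h
        cases hc0 : pvRun c0 with
        | false => exact absurd (hall c0 (List.mem_cons_self)) (by simp [hc0])
        | true =>
          have : pvRun c = true := hall c (List.mem_cons_of_mem _ hc)
          exact hne' (by rw [this, hc0])
      rw [if_neg (by omega : ¬ ((0:Int) + ((c0 :: rest).countP pvRun : Int) = 0)),
          if_neg (by push_cast; omega : ¬ ((0:Int) + ((c0 :: rest).countP pvRun : Int) = ((c0 :: rest).length : Int)))]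
      rw [if_pos hany]
    · -- every later container agrees with the first
      have hall : ∀ c ∈ rest, pvRun c = pvRun c0 := by
        intro c hc
        have := (List.any_eq_false.mp (Bool.not_eq_true _ ▸ hany)) c hc
        simpa using this
      rw [if_neg hany]
      cases hc0 : pvRun c0 with
      | true =>
        have hcnt : (c0 :: rest).countP pvRun = (c0 :: rest).length := by
          apply List.countP_eq_length.mpr
          intro c hc
          rcases List.mem_cons.mp hc with h | h
          · rw [h, hc0]
          · rw [hall c h, hc0]
        have hpos : (c0 :: rest).length ≠ 0 := by simp
        rw [if_neg (by rw [hcnt]; omega),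
            if_pos (by rw [hcnt]; omega)]
        simp
      | false =>
        have hcnt : (c0 :: rest).countP pvRun = 0 := by
          apply List.countP_eq_zero.mpr
          intro c hc
          rcases List.mem_cons.mp hc with h | h
          · simp [h, hc0]
          · simp [hall c h, hc0]
        rw [if_pos (by rw [hcnt]; simp)]
        simp
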